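-- pv_equiv track=rewrite | github.com/snajd123/Ploit | backend/parser/pokerstars_parser.py | _split_hands
-- ===== SOURCE A (Python) =====
-- from typing import List, Dict, Optional, Tuple
--
-- def _split_hands(content: str) -> List[str]:
--     """
--     Split file content into individual hand texts.
--
--     Args:
--         content: Full file content
--
--     Returns:
--         List of individual hand history strings
--     """
--     # Hands are separated by double newlines or start with "PokerStars Hand"
--     hands = []
--     current_hand = []
--
--     for line in content.split('\n'):
--         if line.startswith('PokerStars Hand #') and current_hand:
--             # Start of new hand, save previous
--             hands.append('\n'.join(current_hand))
--             current_hand = [line]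
--         else:
--             current_hand.append(line)
--
--     # Don't forget the last hand
--     if current_hand:
--         hands.append('\n'.join(current_hand))
--
--     return [h.strip() for h in hands if h.strip()]
-- ===== SOURCE B (Python) =====
-- def _split_hands(content):
--     # Staged: index the marker positions first, then cut the line list by slicing
--     # between consecutive boundaries; no running accumulator at all.
--     lines = content.split('\n')
--     cuts = [i for i, line in enumerate(lines)
--             if i > 0 and line.startswith('PokerStars Hand #')]
--     bounds = [0] + cuts + [len(lines)]
--     hands = ['\n'.join(lines[a:b]) for a, b in zip(bounds, bounds[1:])]
--     return [h.strip() for h in hands if h.strip()]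
-- ===== Notes on version B (the rewrite author's own statement) =====
-- stated objective: alternative
-- what changed: Replaces A's single-pass accumulator loop (current_hand buffer flushed into hands at each marker and again after the loop) with staged passes: enumerate the lines to index all marker positions, form the boundary list [0]+cuts+[len], and materialise each hand by slicing the line list between consecutive boundaries.
import Mathlib
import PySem

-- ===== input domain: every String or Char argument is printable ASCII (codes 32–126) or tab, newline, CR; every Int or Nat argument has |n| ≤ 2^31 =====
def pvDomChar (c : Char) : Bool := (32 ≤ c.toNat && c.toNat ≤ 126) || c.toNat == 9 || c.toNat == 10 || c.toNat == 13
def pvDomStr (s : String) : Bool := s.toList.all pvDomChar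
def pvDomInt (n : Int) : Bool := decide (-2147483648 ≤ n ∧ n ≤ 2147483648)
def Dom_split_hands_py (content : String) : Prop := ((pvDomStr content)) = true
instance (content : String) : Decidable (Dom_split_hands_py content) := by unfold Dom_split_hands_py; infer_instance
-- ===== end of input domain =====

-- B replaces A's accumulator loop with staged passes (index marker positions with
-- enumerate, then slice the line list between consecutive boundaries); same cost,
-- a genuinely different decomposition.


-- ===== PORT A =====
-- content.split('\n'): the separator is the nonempty literal "\n"; shared by both ports
def pvSplitLines (content : String) : List String :=
  (PySem.Chars.splitOn content.toList "\n".toList).map (fun cs => String.ofList cs)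

-- one loop step of A: flush current_hand into hands on a marker line, else append the line
def pvStepA (st : List String × List String) (line : String) : List String × List String :=
  if PySem.Str.startswith line "PokerStars Hand #" && !st.2.isEmpty then
    (st.1 ++ [PySem.Str.join "\n" st.2], [line])
  else
    (st.1, st.2 ++ [line])

-- A's trailing "if current_hand: hands.append(...)"
def pvFinishA (st : List String × List String) : List String :=
  if !st.2.isEmpty then st.1 ++ [PySem.Str.join "\n" st.2] else st.1

def split_hands_py (content : String) : List String :=
  let st := (pvSplitLines content).foldl pvStepA ([], [])
  let hands := pvFinishA st
  (hands.filter (fun h => PySem.Str.strip h != "")).map PySem.Str.strip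

-- ===== PORT B =====
def split_hands_py_alt (content : String) : List String :=
  let lines := pvSplitLines content
  let cuts := ((PySem.List.enumerate lines 0).filter
      (fun p => decide ((0:Int) < p.1) && PySem.Str.startswith p.2 "PokerStars Hand #")).map (fun p => p.1)
  let bounds := (0:Int) :: cuts ++ [(lines.length : Int)]
  let hands := (bounds.zip bounds.tail).map
      (fun p => PySem.Str.join "\n" (PySem.List.slice lines (some p.1) (some p.2)))
  (hands.filter (fun h => PySem.Str.strip h != "")).map PySem.Str.strip

-- ===== PRECONDITION & SPEC =====
def Spec_split_hands_py (content : String) (out : List String) : Prop := out = split_hands_py_alt content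
instance (content : String) (out : List String) : Decidable (Spec_split_hands_py content out) := by unfold Spec_split_hands_py; infer_instance

-- ===== CLAIM (what is proved, stated in full; the proofs are below) =====
def Claim_equal_split_hands_py : Prop := ∀ (content : String), Dom_split_hands_py content → Spec_split_hands_py content (split_hands_py content)

-- ===== LEMMAS AND PROOFS =====

-- proof-only characterisation of A's grouping: split a line list into chunks, cutting before markers
def goA (cur : List String) : List String → List (List String)
  | [] => [cur]
  | x :: xs =>
    if PySem.Str.startswith x "PokerStars Hand #" then cur :: goA [x] xs
    else goA (cur ++ [x]) xs

lemma foldA_char (ls : List String) : ∀ (hands cur : List String), cur ≠ [] →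
    pvFinishA (ls.foldl pvStepA (hands, cur)) = hands ++ (goA cur ls).map (PySem.Str.join "\n") := by
  induction ls with
  | nil =>
    intro hands cur hc
    simp [pvFinishA, goA, hc]
  | cons x xs ih =>
    intro hands cur hc
    have hne : cur.isEmpty = false := by simp [hc]
    by_cases hm : PySem.Str.startswith x "PokerStars Hand #" = true
    · have hstep : pvStepA (hands, cur) x = (hands ++ [PySem.Str.join "\n" cur], [x]) := by
        simp only [pvStepA, hne, Bool.not_false, Bool.and_true]
        rw [if_pos hm]
      rw [List.foldl_cons, hstep, ih _ [x] (by simp)]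
      simp only [goA, hm, if_pos, List.map_cons, List.append_assoc, List.singleton_append]
    · have hstep : pvStepA (hands, cur) x = (hands, cur ++ [x]) := by
        simp only [pvStepA, hne, Bool.not_false, Bool.and_true]
        rw [if_neg hm]
      rw [List.foldl_cons, hstep, ih _ (cur ++ [x]) (by simp)]
      simp only [goA]
      rw [if_neg hm]

-- proof-only recursion computing B's cut indices
def cutsGo (i : Nat) : List String → List Int
  | [] => []
  | x :: xs =>
    if 0 < i ∧ PySem.Str.startswith x "PokerStars Hand #" = true then
      (i : Int) :: cutsGo (i + 1) xs
    else cutsGo (i + 1) xs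

lemma enum_filter_cuts (ls : List String) : ∀ (i : Nat),
    ((PySem.List.enumerate ls (i : Int)).filter
      (fun p => decide ((0:Int) < p.1) && PySem.Str.startswith p.2 "PokerStars Hand #")).map (fun p => p.1)
    = cutsGo i ls := by
  induction ls with
  | nil => intro i; simp only [PySem.List.enumerate_nil, List.filter_nil, List.map_nil, cutsGo]
  | cons x xs ih =>
    intro i
    rw [PySem.List.enumerate_cons]
    have h1 : ((i : Int) + 1) = ((i + 1 : Nat) : Int) := by push_cast; ring
    by_cases hm : PySem.Str.startswith x "PokerStars Hand #" = true
    · by_cases hi : 0 < i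
      · rw [List.filter_cons_of_pos (by simp only [hm, Bool.and_true]; exact decide_eq_true (by exact_mod_cast hi))]
        rw [List.map_cons, h1, ih]
        simp only [cutsGo]
        rw [if_pos ⟨hi, hm⟩]
      · have hi0 : i = 0 := by omega
        subst hi0
        rw [List.filter_cons_of_neg (by simp)]
        rw [h1, ih]
        simp only [cutsGo]
        rw [if_neg (by simp)]
    · rw [List.filter_cons_of_neg (by
        rw [show PySem.Str.startswith x "PokerStars Hand #" = false from Bool.eq_false_iff.mpr hm,
          Bool.and_false]
        exact Bool.false_ne_true)]
      rw [h1, ih]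
      simp only [cutsGo]
      rw [if_neg (fun h => hm h.2)]

-- proof-only recursion over the boundary list: chunks of L between consecutive bounds
def sliceChunks (L : List String) (b : Int) : List Int → List (List String)
  | [] => [PySem.List.slice L (some b) (some (L.length : Int))]
  | c :: cs => PySem.List.slice L (some b) (some c) :: sliceChunks L c cs

lemma zip_slices (L : List String) : ∀ (cuts : List Int) (b : Int),
    (((b :: cuts ++ [(L.length : Int)]).zip (cuts ++ [(L.length : Int)])).map
        (fun p => PySem.List.slice L (some p.1) (some p.2)))
    = sliceChunks L b cuts := by
  intro cuts
  induction cuts with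
  | nil => intro b; simp [sliceChunks]
  | cons c cs ih =>
    intro b
    simp only [List.cons_append, List.zip_cons_cons, List.map_cons, sliceChunks]
    congr 1
    exact ih c

lemma slice_middle (pre cur rest : List String) :
    PySem.List.slice (pre ++ cur ++ rest) (some (pre.length : Int))
      (some ((pre.length + cur.length : Nat) : Int)) = cur := by
  rw [PySem.List.slice_natCast]
  rw [List.append_assoc, List.drop_append_of_le_length (by simp)]
  simp [List.take_left']

-- main bridge: A's chunks = B's slices between cut boundaries
lemma goA_eq_slices : ∀ (xs cur pre : List String), cur ≠ [] →
    goA cur xs = sliceChunks (pre ++ cur ++ xs) (pre.length : Int) (cutsGo (pre.length + cur.length) xs) := by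
  intro xs
  induction xs with
  | nil =>
    intro cur pre hc
    have : ((pre ++ cur ++ ([] : List String)).length : Int) = ((pre.length + cur.length : Nat) : Int) := by
      simp
    simp only [cutsGo, sliceChunks, goA, this]
    rw [show pre ++ cur ++ ([] : List String) = pre ++ cur ++ ([] : List String) from rfl,
      slice_middle pre cur []]
  | cons x xs ih =>
    intro cur pre hc
    have hpos : 0 < pre.length + cur.length := by
      have : cur.length ≠ 0 := by simpa using hc
      omega
    by_cases hm : PySem.Str.startswith x "PokerStars Hand #" = true
    · have hcut : cutsGo (pre.length + cur.length) (x :: xs)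
          = ((pre.length + cur.length : Nat) : Int) :: cutsGo (pre.length + cur.length + 1) xs := by
        simp only [cutsGo]
        rw [if_pos ⟨hpos, hm⟩]
      rw [hcut]
      simp only [goA, hm, if_pos, sliceChunks]
      rw [slice_middle pre cur (x :: xs)]
      have ihx := ih [x] (pre ++ cur) (by simp)
      have hL : (pre ++ cur) ++ [x] ++ xs = pre ++ cur ++ (x :: xs) := by simp
      have hlen : ((pre ++ cur).length : Int) = ((pre.length + cur.length : Nat) : Int) := by simp
      have hlen2 : (pre ++ cur).length + ([x] : List String).length = pre.length + cur.length + 1 := by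
        simp [Nat.add_assoc]
      rw [hL, hlen, hlen2] at ihx
      rw [← ihx]
    · have hcut : cutsGo (pre.length + cur.length) (x :: xs) = cutsGo (pre.length + cur.length + 1) xs := by
        simp only [cutsGo]
        rw [if_neg (fun h => hm h.2)]
      rw [hcut]
      simp only [goA]
      rw [if_neg hm]
      have ihx := ih (cur ++ [x]) pre (by simp)
      have hL : pre ++ (cur ++ [x]) ++ xs = pre ++ cur ++ (x :: xs) := by simp
      have hlen2 : pre.length + (cur ++ [x]).length = pre.length + cur.length + 1 := by
        simp [Nat.add_assoc]
      rw [hL, hlen2] at ihx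
      exact ihx

lemma main_on_lists (ls : List String) :
    ((pvFinishA (ls.foldl pvStepA ([], []))).filter (fun h => PySem.Str.strip h != "")).map PySem.Str.strip
    = (((((0:Int) :: (((PySem.List.enumerate ls 0).filter
          (fun p => decide ((0:Int) < p.1) && PySem.Str.startswith p.2 "PokerStars Hand #")).map (fun p => p.1))
            ++ [(ls.length : Int)]).zip
        ((((PySem.List.enumerate ls 0).filter
          (fun p => decide ((0:Int) < p.1) && PySem.Str.startswith p.2 "PokerStars Hand #")).map (fun p => p.1))
            ++ [(ls.length : Int)])).map
        (fun p => PySem.Str.join "\n" (PySem.List.slice ls (some p.1) (some p.2)))).filter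
        (fun h => PySem.Str.strip h != "")).map PySem.Str.strip := by
  have hzip : ∀ (L : List String) (cuts : List Int) (b : Int),
      (((b :: cuts ++ [(L.length : Int)]).zip (cuts ++ [(L.length : Int)])).map
          (fun p => PySem.Str.join "\n" (PySem.List.slice L (some p.1) (some p.2))))
      = (sliceChunks L b cuts).map (PySem.Str.join "\n") := by
    intro L cuts b
    have := congrArg (List.map (PySem.Str.join "\n")) (zip_slices L cuts b)
    rwa [List.map_map] at this
  have henum : ((PySem.List.enumerate ls (0:Int)).filter
      (fun p => decide ((0:Int) < p.1) && PySem.Str.startswith p.2 "PokerStars Hand #")).map (fun p => p.1)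
      = cutsGo 0 ls := by
    have := enum_filter_cuts ls 0
    simpa using this
  rw [henum, hzip ls (cutsGo 0 ls) 0]
  cases ls with
  | nil => decide
  | cons x xs =>
    have h1 : pvStepA ([], []) x = ([], [x]) := by simp [pvStepA]
    rw [List.foldl_cons, h1, foldA_char xs [] [x] (by simp), List.nil_append]
    have hcut0 : cutsGo 0 (x :: xs) = cutsGo 1 xs := by simp [cutsGo]
    have hmain := goA_eq_slices xs [x] [] (by simp)
    have : goA [x] xs = sliceChunks (x :: xs) 0 (cutsGo 1 xs) := by simpa using hmain
    rw [hcut0, ← this]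

-- ===== VERDICT (by name: the statement is the Claim_ definition above) =====
theorem split_hands_py_spec : Claim_equal_split_hands_py := by
  intro content _
  unfold Spec_split_hands_py split_hands_py split_hands_py_alt
  exact main_on_lists (pvSplitLines content)
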